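-- pv_equiv track=rewrite | github.com/wanghong5233/OfferPilot | backend/app/vector_store.py | _chunk_resume_text
-- ===== SOURCE A (Python) =====
-- def _chunk_resume_text(text: str, chunk_size: int = 500, overlap: int = 80) -> list[str]:
--     paragraphs = [p.strip() for p in text.split("\n\n") if p.strip()]
--     if not paragraphs:
--         return []
--
--     chunks: list[str] = []
--     current = ""
--     for para in paragraphs:
--         if len(current) + len(para) + 2 <= chunk_size:
--             current = f"{current}\n\n{para}".strip()
--             continue
--
--         if current:
--             chunks.append(current)
--         current = para
--
--     if current:
--         chunks.append(current)
--
--     # Apply overlap by stitching tail to next chunk for better retrieval continuity.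
--     if overlap <= 0 or len(chunks) <= 1:
--         return chunks
--
--     overlapped: list[str] = [chunks[0]]
--     for i in range(1, len(chunks)):
--         prefix = chunks[i - 1][-overlap:]
--         overlapped.append((prefix + "\n" + chunks[i]).strip())
--     return overlapped
-- ===== SOURCE B (Python) =====
-- def _chunk_resume_text(text: str, chunk_size: int = 500, overlap: int = 80) -> list[str]:
--     # Single fused pass: paragraphs are filtered, packed and overlap-stitched as we go;
--     # no intermediate paragraph list, no separate chunks list, no second loop.
--     result: list[str] = []
--     prev = ""
--     current = ""
--
--     def emit(chunk: str) -> None: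
--         nonlocal prev
--         if not result or overlap <= 0:
--             result.append(chunk)
--         else:
--             result.append((prev[-overlap:] + "\n" + chunk).strip())
--         prev = chunk
--
--     for piece in text.split("\n\n"):
--         para = piece.strip()
--         if not para:
--             continue
--         if len(current) + len(para) + 2 <= chunk_size:
--             current = f"{current}\n\n{para}".strip()
--             continue
--         if current:
--             emit(current)
--         current = para
--
--     if current:
--         emit(current)
--     return result
-- ===== Notes on version B (the rewrite author's own statement) =====
-- stated objective: alternative
-- what changed: A's two sequential passes (pack paragraphs into chunks, then a second index loop stitching each chunk onto the tail of its predecessor) are fused into one pass that filters, packs and emits overlap-stitched chunks on the fly, keeping only the previous raw chunk instead of the whole chunk list and index arithmetic.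
import Mathlib
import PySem

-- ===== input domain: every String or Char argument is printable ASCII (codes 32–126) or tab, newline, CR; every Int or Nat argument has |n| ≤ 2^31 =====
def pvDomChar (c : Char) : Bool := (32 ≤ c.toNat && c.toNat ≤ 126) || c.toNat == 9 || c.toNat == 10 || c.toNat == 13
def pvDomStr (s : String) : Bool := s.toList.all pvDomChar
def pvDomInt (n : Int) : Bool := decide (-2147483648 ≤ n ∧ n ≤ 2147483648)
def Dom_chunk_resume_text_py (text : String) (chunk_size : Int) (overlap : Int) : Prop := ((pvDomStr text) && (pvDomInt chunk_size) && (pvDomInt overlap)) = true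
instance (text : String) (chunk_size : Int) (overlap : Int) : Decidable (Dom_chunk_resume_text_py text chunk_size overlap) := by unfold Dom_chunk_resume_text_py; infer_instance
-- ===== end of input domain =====

-- B fuses A's two sequential passes (pack paragraphs into chunks, then stitch overlaps) into a
-- single pass that filters, packs and emits overlap-stitched chunks as it goes (objective: alternative decomposition, same cost).

-- ===== PORT A =====
-- literal port of _chunk_resume_text; the separator "\n\n" is a nonempty literal, so
-- PySem.Str.split? is always `some` and the `getD []` default is never used.
def chunk_resume_text_py (text : String) (chunk_size : Int) (overlap : Int) : List String :=
  let paragraphs := ((PySem.Str.split? text "\n\n").getD []).filterMap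
    (fun p => if PySem.Str.strip p = "" then none else some (PySem.Str.strip p))
  if paragraphs = [] then []
  else
    let st := paragraphs.foldl
      (fun (st : List String × String) para =>
        if PySem.Str.len st.2 + PySem.Str.len para + 2 ≤ chunk_size then
          (st.1, PySem.Str.strip (st.2 ++ "\n\n" ++ para))
        else if st.2 ≠ "" then (st.1 ++ [st.2], para)
        else (st.1, para))
      ([], "")
    let chunks := if st.2 ≠ "" then st.1 ++ [st.2] else st.1
    if overlap ≤ 0 ∨ chunks.length ≤ 1 then chunks
    else
      (PySem.List.pyRange 1 (chunks.length : Int)).foldl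
        (fun acc i => acc ++ [PySem.Str.strip
            (PySem.Str.slice (PySem.List.pyGetD chunks (i - 1) "") (some (-overlap)) none
              ++ "\n" ++ PySem.List.pyGetD chunks i "")])
        [PySem.List.pyGetD chunks 0 ""]

-- ===== PORT B =====
-- `emit` of Source B: append `chunk` to `res` (stitched onto `prev`'s tail unless the result is
-- empty or overlap ≤ 0); the updated `prev` is the emitted raw chunk itself.
def pvEmit (overlap : Int) (res : List String) (prev chunk : String) : List String :=
  if res = [] ∨ overlap ≤ 0 then res ++ [chunk]
  else res ++ [PySem.Str.strip (PySem.Str.slice prev (some (-overlap)) none ++ "\n" ++ chunk)]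

-- literal port of Source B: one fold over the split pieces, state ((result, prev), current).
def chunk_resume_text_py_alt (text : String) (chunk_size : Int) (overlap : Int) : List String :=
  let st := ((PySem.Str.split? text "\n\n").getD []).foldl
    (fun (st : (List String × String) × String) piece =>
      let para := PySem.Str.strip piece
      if para = "" then st
      else if PySem.Str.len st.2 + PySem.Str.len para + 2 ≤ chunk_size then
        (st.1, PySem.Str.strip (st.2 ++ "\n\n" ++ para))
      else if st.2 ≠ "" then ((pvEmit overlap st.1.1 st.1.2 st.2, st.2), para)
      else (st.1, para))
    (([], ""), "")
  if st.2 ≠ "" then pvEmit overlap st.1.1 st.1.2 st.2 else st.1.1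

-- ===== PRECONDITION & SPEC =====
def Spec_chunk_resume_text_py (text : String) (chunk_size : Int) (overlap : Int) (out : List String) : Prop := out = chunk_resume_text_py_alt text chunk_size overlap
instance (text : String) (chunk_size : Int) (overlap : Int) (out : List String) : Decidable (Spec_chunk_resume_text_py text chunk_size overlap out) := by unfold Spec_chunk_resume_text_py; infer_instance

-- ===== CLAIM (what is proved, stated in full; the proofs are below) =====
def Claim_equal_chunk_resume_text_py : Prop := ∀ (text : String) (chunk_size : Int) (overlap : Int), Dom_chunk_resume_text_py text chunk_size overlap → Spec_chunk_resume_text_py text chunk_size overlap (chunk_resume_text_py text chunk_size overlap)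

-- ===== LEMMAS AND PROOFS =====

-- what A's second pass prepends to chunk i: the tail of the previous chunk plus a newline
def pvStitch (overlap : Int) (prev c : String) : String :=
  PySem.Str.strip (PySem.Str.slice prev (some (-overlap)) none ++ "\n" ++ c)

-- stitch every chunk of the list onto its predecessor (`prev` is the predecessor of the head)
def pvStitchL (overlap : Int) : String → List String → List String
  | _, [] => []
  | prev, x :: xs => pvStitch overlap prev x :: pvStitchL overlap x xs

-- A's whole overlap pass as a function of the raw chunk list
def pvOv (overlap : Int) : List String → List String
  | [] => []
  | c :: cs => if overlap ≤ 0 then c :: cs else c :: pvStitchL overlap c cs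

lemma pvOv_of_nonpos (overlap : Int) (h : overlap ≤ 0) (l : List String) :
    pvOv overlap l = l := by
  cases l
  · simp [pvOv]
  · simp [pvOv, h]

lemma pvStitchL_append (overlap : Int) (c : String) :
    ∀ (cs : List String) (prev : String),
      pvStitchL overlap prev (cs ++ [c])
        = pvStitchL overlap prev cs ++ [pvStitch overlap ((prev :: cs).getLast (by simp)) c] := by
  intro cs
  induction cs with
  | nil => intro prev; simp [pvStitchL]
  | cons x xs ih => intro prev; simp [pvStitchL, ih x, List.getLast_cons]

lemma pvOv_append (overlap : Int) (chunks : List String) (c : String) :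
    pvOv overlap (chunks ++ [c])
      = pvEmit overlap (pvOv overlap chunks) (chunks.getLastD "") c := by
  cases chunks with
  | nil => simp [pvOv, pvStitchL, pvEmit]
  | cons c0 cs =>
    by_cases hov : overlap ≤ 0
    · simp [pvOv, pvEmit, hov]
    · have h2 : (c0 :: cs).getLast (by simp) = (c0 :: cs).getLastD "" := by
        rw [List.getLastD_eq_getLast?, List.getLast?_eq_some_getLast (by simp)]
        rfl
      rw [show (c0 :: cs) ++ [c] = c0 :: (cs ++ [c]) from rfl]
      simp only [pvOv, pvEmit, hov, pvStitchL_append, h2, pvStitch]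
      simp

-- B's fold over the raw split pieces is the paragraph-level fold over A's `paragraphs` list
lemma foldl_strip_filter {σ : Type} (f : σ → String → σ) :
    ∀ (l : List String) (s : σ),
      l.foldl (fun st p => if PySem.Str.strip p = "" then st else f st (PySem.Str.strip p)) s
        = (l.filterMap (fun p => if PySem.Str.strip p = "" then none
              else some (PySem.Str.strip p))).foldl f s := by
  intro l
  induction l with
  | nil => intro s; simp
  | cons x xs ih => intro s; by_cases h : PySem.Str.strip x = "" <;> simp [h, ih]

-- the loop invariant: B's state is (A's chunks mapped through the overlap pass, their last, A's current)
lemma loop_inv (chunk_size overlap : Int) :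
    ∀ (ps : List String) (chunks : List String) (cur : String),
      ps.foldl
        (fun (st : (List String × String) × String) para =>
          if PySem.Str.len st.2 + PySem.Str.len para + 2 ≤ chunk_size then
            (st.1, PySem.Str.strip (st.2 ++ "\n\n" ++ para))
          else if st.2 ≠ "" then ((pvEmit overlap st.1.1 st.1.2 st.2, st.2), para)
          else (st.1, para))
        ((pvOv overlap chunks, chunks.getLastD ""), cur)
      = ((pvOv overlap (ps.foldl
            (fun (st : List String × String) para =>
              if PySem.Str.len st.2 + PySem.Str.len para + 2 ≤ chunk_size then
                (st.1, PySem.Str.strip (st.2 ++ "\n\n" ++ para))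
              else if st.2 ≠ "" then (st.1 ++ [st.2], para)
              else (st.1, para))
            (chunks, cur)).1,
          ((ps.foldl
            (fun (st : List String × String) para =>
              if PySem.Str.len st.2 + PySem.Str.len para + 2 ≤ chunk_size then
                (st.1, PySem.Str.strip (st.2 ++ "\n\n" ++ para))
              else if st.2 ≠ "" then (st.1 ++ [st.2], para)
              else (st.1, para))
            (chunks, cur)).1).getLastD ""),
         (ps.foldl
            (fun (st : List String × String) para =>
              if PySem.Str.len st.2 + PySem.Str.len para + 2 ≤ chunk_size then
                (st.1, PySem.Str.strip (st.2 ++ "\n\n" ++ para))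
              else if st.2 ≠ "" then (st.1 ++ [st.2], para)
              else (st.1, para))
            (chunks, cur)).2) := by
  intro ps
  induction ps with
  | nil => intro chunks cur; simp
  | cons p ps ih =>
    intro chunks cur
    simp only [List.foldl_cons]
    by_cases h1 : (cur.length : Int) + (p.length : Int) + 2 ≤ chunk_size
    · simpa [h1] using ih chunks (PySem.Str.strip (cur ++ "\n\n" ++ p))
    · by_cases h2 : cur = ""
      · subst h2
        simp only [String.length_empty, Nat.cast_zero, zero_add] at h1
        simpa [h1] using ih chunks p
      · have e : pvEmit overlap (pvOv overlap chunks) (chunks.getLastD "") cur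
            = pvOv overlap (chunks ++ [cur]) := (pvOv_append overlap chunks cur).symm
        have hl : (chunks ++ [cur]).getLastD "" = cur := by simp
        have h3 := ih (chunks ++ [cur]) p
        rw [hl] at h3
        simpa [h1, h2, ← e] using h3

-- A's index-driven second pass computes pvStitchL, one stitched element per index
lemma map_range_stitch (overlap : Int) :
    ∀ (cs : List String) (pre : List String) (c : String),
      (PySem.List.pyRange ((pre.length + 1 : Nat) : Int) ((pre.length + 1 + cs.length : Nat) : Int)).map
        (fun i => pvStitch overlap (PySem.List.pyGetD (pre ++ c :: cs) (i - 1) "")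
                    (PySem.List.pyGetD (pre ++ c :: cs) i ""))
        = pvStitchL overlap c cs := by
  intro cs
  induction cs with
  | nil => intro pre c; simp [PySem.List.pyRange, pvStitchL]
  | cons x xs ih =>
    intro pre c
    have hlt : ((pre.length + 1 : Nat) : Int) < ((pre.length + 1 + (x :: xs).length : Nat) : Int) := by
      norm_cast; simp
    rw [PySem.List.pyRange_one_cons hlt, List.map_cons]
    have h1 : ((pre.length + 1 : Nat) : Int) - 1 = ((pre.length : Nat) : Int) := by push_cast; ring
    have hg0 : PySem.List.pyGetD (pre ++ c :: x :: xs) ((pre.length : Nat) : Int) "" = c := by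
      rw [PySem.List.pyGetD_natCast]; simp [List.getD]
    have hg1 : PySem.List.pyGetD (pre ++ c :: x :: xs) ((pre.length + 1 : Nat) : Int) "" = x := by
      rw [PySem.List.pyGetD_natCast]; simp [List.getD]
    have hhead : pvStitch overlap
        (PySem.List.pyGetD (pre ++ c :: x :: xs) (((pre.length + 1 : Nat) : Int) - 1) "")
        (PySem.List.pyGetD (pre ++ c :: x :: xs) ((pre.length + 1 : Nat) : Int) "")
        = pvStitch overlap c x := by rw [h1, hg0, hg1]
    have htail := ih (pre ++ [c]) x
    have e2 : (((pre ++ [c]).length + 1 : Nat) : Int) = ((pre.length + 1 : Nat) : Int) + 1 := by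
      push_cast [List.length_append, List.length_cons, List.length_nil]; ring
    have e3 : (((pre ++ [c]).length + 1 + xs.length : Nat) : Int)
        = ((pre.length + 1 + (x :: xs).length : Nat) : Int) := by
      push_cast [List.length_append, List.length_cons, List.length_nil]; ring
    have e4 : (pre ++ [c]) ++ x :: xs = pre ++ c :: x :: xs := by simp
    rw [e2, e3, e4] at htail
    rw [show pvStitchL overlap c (x :: xs) = pvStitch overlap c x :: pvStitchL overlap x xs from rfl]
    exact List.cons_eq_cons.mpr ⟨hhead, htail⟩

-- B's fold, with its inline filtering, as a fold over A's `paragraphs` list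
lemma foldl_strip_filter' (chunk_size overlap : Int) (l : List String)
    (s : (List String × String) × String) :
    l.foldl (fun (st : (List String × String) × String) piece =>
        let para := PySem.Str.strip piece
        if para = "" then st
        else if PySem.Str.len st.2 + PySem.Str.len para + 2 ≤ chunk_size then
          (st.1, PySem.Str.strip (st.2 ++ "\n\n" ++ para))
        else if st.2 ≠ "" then ((pvEmit overlap st.1.1 st.1.2 st.2, st.2), para)
        else (st.1, para)) s
    = (l.filterMap (fun p => if PySem.Str.strip p = "" then none
          else some (PySem.Str.strip p))).foldl
        (fun (st : (List String × String) × String) para =>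
          if PySem.Str.len st.2 + PySem.Str.len para + 2 ≤ chunk_size then
            (st.1, PySem.Str.strip (st.2 ++ "\n\n" ++ para))
          else if st.2 ≠ "" then ((pvEmit overlap st.1.1 st.1.2 st.2, st.2), para)
          else (st.1, para)) s :=
  foldl_strip_filter
    (fun (st : (List String × String) × String) para =>
      if PySem.Str.len st.2 + PySem.Str.len para + 2 ≤ chunk_size then
        (st.1, PySem.Str.strip (st.2 ++ "\n\n" ++ para))
      else if st.2 ≠ "" then ((pvEmit overlap st.1.1 st.1.2 st.2, st.2), para)
      else (st.1, para)) l s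

-- A's whole second pass (guard plus index loop) computes pvOv
lemma a_second_pass (overlap : Int) (chunks : List String) :
    (if overlap ≤ 0 ∨ chunks.length ≤ 1 then chunks
     else (PySem.List.pyRange 1 (chunks.length : Int)).foldl
        (fun acc i => acc ++ [PySem.Str.strip
            (PySem.Str.slice (PySem.List.pyGetD chunks (i - 1) "") (some (-overlap)) none
              ++ "\n" ++ PySem.List.pyGetD chunks i "")])
        [PySem.List.pyGetD chunks 0 ""])
    = pvOv overlap chunks := by
  by_cases hov : overlap ≤ 0
  · simp [hov, pvOv_of_nonpos]
  · cases chunks with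
    | nil => simp [pvOv]
    | cons c cs =>
      cases cs with
      | nil => simp [pvOv, hov, pvStitchL]
      | cons x xs =>
        rw [if_neg (by simp [hov])]
        rw [PySem.List.foldl_append_singleton_eq_map]
        have h := map_range_stitch overlap (x :: xs) [] c
        simp only [List.nil_append, List.length_nil, Nat.zero_add] at h
        have e1 : ((1 : Nat) : Int) = (1 : Int) := by norm_cast
        have e2 : ((1 + (x :: xs).length : Nat) : Int) = ((c :: x :: xs).length : Int) := by
          simp [List.length_cons]; ring
        rw [e1, e2] at h
        simp only [pvStitch] at h
        rw [h]
        simp [pvOv, hov]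

-- the two programs agree for every paragraph list P (A's side on the left, B's on the right)
lemma pack_eq (chunk_size overlap : Int) (P : List String) :
    (if P = [] then []
     else
       let st := P.foldl
         (fun (st : List String × String) para =>
           if PySem.Str.len st.2 + PySem.Str.len para + 2 ≤ chunk_size then
             (st.1, PySem.Str.strip (st.2 ++ "\n\n" ++ para))
           else if st.2 ≠ "" then (st.1 ++ [st.2], para)
           else (st.1, para))
         ([], "")
       let chunks := if st.2 ≠ "" then st.1 ++ [st.2] else st.1
       if overlap ≤ 0 ∨ chunks.length ≤ 1 then chunks
       else
         (PySem.List.pyRange 1 (chunks.length : Int)).foldl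
           (fun acc i => acc ++ [PySem.Str.strip
               (PySem.Str.slice (PySem.List.pyGetD chunks (i - 1) "") (some (-overlap)) none
                 ++ "\n" ++ PySem.List.pyGetD chunks i "")])
           [PySem.List.pyGetD chunks 0 ""])
    = (let st := P.foldl
         (fun (st : (List String × String) × String) para =>
           if PySem.Str.len st.2 + PySem.Str.len para + 2 ≤ chunk_size then
             (st.1, PySem.Str.strip (st.2 ++ "\n\n" ++ para))
           else if st.2 ≠ "" then ((pvEmit overlap st.1.1 st.1.2 st.2, st.2), para)
           else (st.1, para))
         (([], ""), "")
       if st.2 ≠ "" then pvEmit overlap st.1.1 st.1.2 st.2 else st.1.1) := by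
  have hinv := loop_inv chunk_size overlap P [] ""
  rw [show ((pvOv overlap [], ([] : List String).getLastD ""), "") = ((([] : List String), ""), "") from rfl] at hinv
  rw [hinv]
  by_cases hP : P = []
  · subst hP; simp [pvOv]
  · rw [if_neg hP]
    generalize P.foldl
      (fun (st : List String × String) para =>
        if PySem.Str.len st.2 + PySem.Str.len para + 2 ≤ chunk_size then
          (st.1, PySem.Str.strip (st.2 ++ "\n\n" ++ para))
        else if st.2 ≠ "" then (st.1 ++ [st.2], para)
        else (st.1, para))
      ([], "") = stA
    obtain ⟨chunksA, curA⟩ := stA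
    by_cases hc : curA = ""
    · subst hc
      simp only [ne_eq, not_true_eq_false, reduceIte]
      exact a_second_pass overlap chunksA
    · simp only [ne_eq, hc, not_false_eq_true, if_pos]
      rw [show pvEmit overlap (pvOv overlap chunksA) (chunksA.getLastD "") curA
            = pvOv overlap (chunksA ++ [curA]) from (pvOv_append overlap chunksA curA).symm]
      exact a_second_pass overlap (chunksA ++ [curA])

-- ===== VERDICT (by name: the statement is the Claim_ definition above) =====
theorem chunk_resume_text_py_spec : Claim_equal_chunk_resume_text_py := by
  intro text chunk_size overlap _
  unfold Spec_chunk_resume_text_py chunk_resume_text_py chunk_resume_text_py_alt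
  rw [foldl_strip_filter' chunk_size overlap]
  exact pack_eq chunk_size overlap
    (((PySem.Str.split? text "\n\n").getD []).filterMap (fun p =>
        if PySem.Str.strip p = "" then none else some (PySem.Str.strip p)))
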